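-- pv_equiv track=rewrite | github.com/tagyoureit/unistore_performance_analysis | backend/core/table_profiler.py | _pick_id_column_case_insensitive
-- ===== SOURCE A (Python) =====
-- from typing import Optional, Sequence
--
-- def _pick_id_column_case_insensitive(columns: dict[str, str]) -> Optional[str]:
--     """
--     Pick a likely key column (used for point lookups / updates) - case insensitive.
--
--     For PostgreSQL which stores unquoted identifiers in lowercase.
--     """
--
--     def _is_numeric_type(typ: str) -> bool:
--         t = str(typ or "").upper()
--         return any(x in t for x in ("NUMBER", "INT", "BIGINT", "DECIMAL", "SERIAL"))
--
--     upper_to_orig = {k.upper(): k for k in columns}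
--
--     if "ID" in upper_to_orig:
--         return upper_to_orig["ID"]
--
--     id_like: list[str] = []
--     key_like: list[str] = []
--     contains_id: list[str] = []
--     contains_key: list[str] = []
--
--     for name, typ in columns.items():
--         if not _is_numeric_type(typ):
--             continue
--         n = str(name or "").upper()
--         if n == "ID":
--             continue
--         if n.endswith("_ID") or n.endswith("ID"):
--             id_like.append(name)
--             continue
--         if n.endswith("_KEY") or n.endswith("KEY"):
--             key_like.append(name)
--             continue
--         if "ID" in n:
--             contains_id.append(name)
--             continue
--         if "KEY" in n:
--             contains_key.append(name)
--             continue
--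
--     for bucket in (id_like, key_like, contains_id, contains_key):
--         if bucket:
--             return bucket[0]
--
--     return None
-- ===== SOURCE B (Python) =====
-- from typing import Optional
--
--
-- def _pick_id_column_case_insensitive(columns: dict[str, str]) -> Optional[str]:
--     """Pick a likely key column, case-insensitively: single ranked pass, no bucket lists."""
--     exact = None
--     for k in columns:
--         if k.upper() == "ID":
--             exact = k  # last-wins, like the upper->original map
--     if exact is not None:
--         return exact
--
--     best_rank = 5
--     best: Optional[str] = None
--     for name, typ in columns.items():
--         if not any(x in typ.upper() for x in ("NUMBER", "INT", "BIGINT", "DECIMAL", "SERIAL")):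
--             continue
--         n = name.upper()
--         if n.endswith(("_ID", "ID")):
--             r = 1
--         elif n.endswith(("_KEY", "KEY")):
--             r = 2
--         elif "ID" in n:
--             r = 3
--         elif "KEY" in n:
--             r = 4
--         else:
--             continue
--         if r < best_rank:
--             best_rank, best = r, name
--     return best
-- ===== Notes on version B (the rewrite author's own statement) =====
-- stated objective: simpler
-- what changed: B drops the upper->original dict (a direct last-wins scan for an exact 'ID' key) and replaces A's four bucket lists plus final bucket scan by a single pass keeping one running (best_rank, best_name) pair, returning best_name directly.
import Mathlib
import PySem

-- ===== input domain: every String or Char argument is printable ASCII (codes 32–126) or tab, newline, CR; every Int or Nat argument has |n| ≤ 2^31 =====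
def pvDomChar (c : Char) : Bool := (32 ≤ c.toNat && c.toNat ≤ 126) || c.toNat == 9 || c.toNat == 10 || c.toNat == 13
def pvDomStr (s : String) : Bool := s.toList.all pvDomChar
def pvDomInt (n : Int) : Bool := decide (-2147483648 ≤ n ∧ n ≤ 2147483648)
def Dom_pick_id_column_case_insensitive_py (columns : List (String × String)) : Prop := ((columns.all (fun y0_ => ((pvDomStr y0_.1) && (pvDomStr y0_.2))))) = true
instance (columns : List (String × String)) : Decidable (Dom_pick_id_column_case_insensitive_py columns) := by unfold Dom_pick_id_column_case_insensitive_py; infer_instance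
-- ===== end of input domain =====

-- B replaces A's four bucket lists and final bucket scan by one running (rank, best) pair,
-- and the upper->original dict by a direct last-wins scan: same values, simpler decomposition.

-- ===== PORT A =====
-- _is_numeric_type(typ): 'str(typ or "")' is the identity on str, ported as upper typ
def pvNumericA (typ : String) : Bool :=
  ["NUMBER", "INT", "BIGINT", "DECIMAL", "SERIAL"].any
    (fun x => PySem.Str.isIn x (PySem.Str.upper typ))

-- the body of A's classification loop: state = (id_like, key_like, contains_id, contains_key)
def pvStepA (s : List String × List String × List String × List String) (p : String × String) :
    List String × List String × List String × List String :=
  if !(pvNumericA p.2) then s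
  else
    -- 'str(name or "")' is the identity on str
    let n := PySem.Str.upper p.1
    if n == "ID" then s
    else if PySem.Str.endswith n "_ID" || PySem.Str.endswith n "ID" then
      (s.1 ++ [p.1], s.2.1, s.2.2.1, s.2.2.2)
    else if PySem.Str.endswith n "_KEY" || PySem.Str.endswith n "KEY" then
      (s.1, s.2.1 ++ [p.1], s.2.2.1, s.2.2.2)
    else if PySem.Str.isIn "ID" n then
      (s.1, s.2.1, s.2.2.1 ++ [p.1], s.2.2.2)
    else if PySem.Str.isIn "KEY" n then
      (s.1, s.2.1, s.2.2.1, s.2.2.2 ++ [p.1])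
    else s

def pick_id_column_case_insensitive_py (columns : List (String × String)) : Option String :=
  let upper_to_orig :=
    columns.foldl (fun d p => d.insert (PySem.Str.upper p.1) p.1)
      (PySem.Dict.empty : PySem.Dict String String)
  match upper_to_orig.get? "ID" with
  | some k => some k
  | none =>
    let s := columns.foldl pvStepA ([], [], [], [])
    -- for bucket in (id_like, key_like, contains_id, contains_key): if bucket: return bucket[0]
    match s.1 with
    | x :: _ => some x
    | [] =>
      match s.2.1 with
      | x :: _ => some x
      | [] =>
        match s.2.2.1 with
        | x :: _ => some x
        | [] =>
          match s.2.2.2 with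
          | x :: _ => some x
          | [] => none

-- ===== PORT B =====
-- the body of B's ranked loop: state = (best_rank, best)
def pvStepB (t : Int × Option String) (p : String × String) : Int × Option String :=
  if !(["NUMBER", "INT", "BIGINT", "DECIMAL", "SERIAL"].any
        (fun x => PySem.Str.isIn x (PySem.Str.upper p.2))) then t
  else
    let n := PySem.Str.upper p.1
    let r? : Option Int :=
      if PySem.Str.endswith n "_ID" || PySem.Str.endswith n "ID" then some 1
      else if PySem.Str.endswith n "_KEY" || PySem.Str.endswith n "KEY" then some 2
      else if PySem.Str.isIn "ID" n then some 3
      else if PySem.Str.isIn "KEY" n then some 4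
      else none
    match r? with
    | none => t
    | some r => if r < t.1 then (r, some p.1) else t

def pick_id_column_case_insensitive_py_alt (columns : List (String × String)) : Option String :=
  let exact := columns.foldl
    (fun acc p => if PySem.Str.upper p.1 == "ID" then some p.1 else acc) none
  match exact with
  | some k => some k
  | none => (columns.foldl pvStepB (5, none)).2

-- ===== PRECONDITION & SPEC =====
def Spec_pick_id_column_case_insensitive_py (columns : List (String × String)) (out : Option String) : Prop := out = pick_id_column_case_insensitive_py_alt columns
instance (columns : List (String × String)) (out : Option String) : Decidable (Spec_pick_id_column_case_insensitive_py columns out) := by unfold Spec_pick_id_column_case_insensitive_py; infer_instance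

-- ===== CLAIM (what is proved, stated in full; the proofs are below) =====
def Claim_equal_pick_id_column_case_insensitive_py : Prop := ∀ (columns : List (String × String)), Dom_pick_id_column_case_insensitive_py columns → Spec_pick_id_column_case_insensitive_py columns (pick_id_column_case_insensitive_py columns)

-- ===== LEMMAS AND PROOFS =====

-- the value A's final bucket scan extracts from a bucket state
def pvSel (s : List String × List String × List String × List String) : Option String :=
  s.1.head?.or (s.2.1.head?.or (s.2.2.1.head?.or s.2.2.2.head?))

-- the rank B's state would carry for that bucket state
def pvRank (s : List String × List String × List String × List String) : Int :=
  if s.1 = [] then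
    if s.2.1 = [] then
      if s.2.2.1 = [] then
        if s.2.2.2 = [] then 5 else 4
      else 3
    else 2
  else 1

-- A's dict lookup of "ID" is the last-wins scan B performs
theorem pv_dict_last (cols : List (String × String)) (d : PySem.Dict String String) :
    (cols.foldl (fun d p => d.insert (PySem.Str.upper p.1) p.1) d).get? "ID"
      = cols.foldl (fun acc p => if PySem.Str.upper p.1 == "ID" then some p.1 else acc)
          (d.get? "ID") := by
  induction cols generalizing d with
  | nil => rfl
  | cons p t ih =>
    simp only [List.foldl_cons, ih]
    congr 1
    rw [PySem.Dict.get?_insert]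
    by_cases h : PySem.Str.upper p.1 = "ID"
    · simp [h]
    · simp [h, Ne.symm h]

theorem pv_scan_some (cols : List (String × String)) (x : String) :
    cols.foldl (fun acc p => if PySem.Str.upper p.1 == "ID" then some p.1 else acc)
      (some x) ≠ none := by
  induction cols generalizing x with
  | nil => simp
  | cons p t ih =>
    simp only [List.foldl_cons]
    split <;> exact ih _

theorem pv_scan_none (cols : List (String × String))
    (h : cols.foldl (fun acc p => if PySem.Str.upper p.1 == "ID" then some p.1 else acc)
          none = none) :
    ∀ p ∈ cols, PySem.Str.upper p.1 ≠ "ID" := by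
  induction cols with
  | nil => simp
  | cons q t ih =>
    simp only [List.foldl_cons] at h
    by_cases hq : PySem.Str.upper q.1 = "ID"
    · exact absurd h (by simpa [hq] using pv_scan_some t q.1)
    · intro p hp
      rcases List.mem_cons.mp hp with hp | hp
      · simpa [hp] using hq
      · exact ih (by simpa [hq] using h) p hp

-- one step: B's state stays (rank, selection) of A's bucket state
theorem pv_step (s : List String × List String × List String × List String)
    (p : String × String) (hp : PySem.Str.upper p.1 ≠ "ID") :
    pvStepB (pvRank s, pvSel s) p = (pvRank (pvStepA s p), pvSel (pvStepA s p)) := by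
  obtain ⟨a, b, c, d⟩ := s
  have hpb : (PySem.Str.upper p.1 == "ID") = false := by simpa using hp
  simp only [pvStepA, pvStepB, pvNumericA, hpb, Bool.false_eq_true, if_false]
  split_ifs <;>
    cases a <;> cases b <;> cases c <;> cases d <;>
    simp [pvRank, pvSel]

-- the whole loop, by induction
theorem pv_fold (cols : List (String × String))
    (h : ∀ p ∈ cols, PySem.Str.upper p.1 ≠ "ID")
    (s : List String × List String × List String × List String) :
    cols.foldl pvStepB (pvRank s, pvSel s)
      = (pvRank (cols.foldl pvStepA s), pvSel (cols.foldl pvStepA s)) := by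
  induction cols generalizing s with
  | nil => rfl
  | cons p t ih =>
    simp only [List.foldl_cons]
    rw [pv_step s p (h p (List.mem_cons_self))]
    exact ih (fun q hq => h q (List.mem_cons_of_mem _ hq)) _

-- A's final bucket scan computes pvSel
theorem pv_sel_match (s : List String × List String × List String × List String) :
    (match s.1 with
      | x :: _ => some x
      | [] =>
        match s.2.1 with
        | x :: _ => some x
        | [] =>
          match s.2.2.1 with
          | x :: _ => some x
          | [] =>
            match s.2.2.2 with
            | x :: _ => some x
            | [] => none) = pvSel s := by
  obtain ⟨a, b, c, d⟩ := s
  cases a <;> cases b <;> cases c <;> cases d <;> simp [pvSel]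

-- ===== VERDICT (by name: the statement is the Claim_ definition above) =====
theorem pick_id_column_case_insensitive_py_spec : Claim_equal_pick_id_column_case_insensitive_py := by
  intro cols _
  unfold Spec_pick_id_column_case_insensitive_py
  show pick_id_column_case_insensitive_py cols = pick_id_column_case_insensitive_py_alt cols
  simp only [pick_id_column_case_insensitive_py, pick_id_column_case_insensitive_py_alt]
  rw [pv_dict_last cols PySem.Dict.empty, PySem.Dict.get?_empty]
  cases hscan : cols.foldl
      (fun acc p => if PySem.Str.upper p.1 == "ID" then some p.1 else acc) none with
  | some k => rfl
  | none =>
    have hno := pv_scan_none cols hscan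
    have h5 : ((5 : Int), (none : Option String))
        = (pvRank ([], [], [], []), pvSel ([], [], [], [])) := rfl
    rw [pv_sel_match, h5, pv_fold cols hno ([], [], [], [])]
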